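-- pv_equiv track=rewrite | github.com/Nignik/Matura | 2016/gra_w_zycie.py | compute_generations
-- ===== SOURCE A (Python) =====
-- import copy
--
-- def count_neighbors(cells, i, j):
--     neighbors_alive = 0
--     n = len(cells)
--     m = len(cells[0])
--
--     for d in ((0, -1), (1, 0), (0, 1), (-1, 0), (-1, -1), (-1, 1), (1, 1), (1, -1)):
--         if cells[(i + d[0] + n) % n][(j + d[1] + m) % m]:
--             neighbors_alive += 1
--
--     return neighbors_alive
--
-- def compute_generations(cells, num_of_gens):
--     n = len(cells)
--     m = len(cells[0])
--
--     for g in range(num_of_gens):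
--         cp = copy.deepcopy(cells)
--         for i in range(n):
--             for j in range(m):
--                 neighbors_alive = count_neighbors(cp, i, j)
--
--                 if cp[i][j]:
--                     if neighbors_alive < 2 or neighbors_alive > 3:
--                         cells[i][j] = 0
--                 elif neighbors_alive == 3:
--                     cells[i][j] = 1
--
--     return cells
-- ===== SOURCE B (Python) =====
-- def compute_generations(cells, num_of_gens):
--     n = len(cells)
--     m = len(cells[0])
--     offsets = ((0, -1), (1, 0), (0, 1), (-1, 0), (-1, -1), (-1, 1), (1, 1), (1, -1))
--     for _ in range(num_of_gens):
--         # 0/1 snapshot of the m-wide live area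
--         alive = [[1 if v else 0 for v in row[:m]] for row in cells]
--         # neighbor counts = elementwise sum of the eight torus-rotated copies of `alive`
--         counts = [[0] * m for _ in range(n)]
--         for di, dj in offsets:
--             k = di % n
--             rows = alive[k:] + alive[:k]
--             if m:
--                 kj = dj % m
--                 rows = [r[kj:] + r[:kj] for r in rows]
--             counts = [[c + s for c, s in zip(crow, srow)]
--                       for crow, srow in zip(counts, rows)]
--         # write the next generation back into the original row objects
--         for i in range(n):
--             row = cells[i]
--             crow = counts[i]
--             for j in range(m):
--                 c = crow[j]
--                 if row[j]:
--                     if c < 2 or c > 3: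
--                         row[j] = 0
--                 elif c == 3:
--                     row[j] = 1
--     return cells
-- ===== Notes on version B (the rewrite author's own statement) =====
-- stated objective: alternative
-- what changed: Each generation, instead of A's per-cell loop over 8 modular index lookups, B builds a 0/1 liveness grid and computes the whole neighbor-count grid as the elementwise sum of eight torus-rotated (row- and column-rotated via slicing) copies of it, then writes the next generation back from that precomputed count grid.
-- outside the precondition, e.g. on compute_generations([], 0): A raises IndexError, B raises IndexError; on compute_generations([[1, 1], [0]], 1): A raises IndexError, B raises IndexError
import Mathlib
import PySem

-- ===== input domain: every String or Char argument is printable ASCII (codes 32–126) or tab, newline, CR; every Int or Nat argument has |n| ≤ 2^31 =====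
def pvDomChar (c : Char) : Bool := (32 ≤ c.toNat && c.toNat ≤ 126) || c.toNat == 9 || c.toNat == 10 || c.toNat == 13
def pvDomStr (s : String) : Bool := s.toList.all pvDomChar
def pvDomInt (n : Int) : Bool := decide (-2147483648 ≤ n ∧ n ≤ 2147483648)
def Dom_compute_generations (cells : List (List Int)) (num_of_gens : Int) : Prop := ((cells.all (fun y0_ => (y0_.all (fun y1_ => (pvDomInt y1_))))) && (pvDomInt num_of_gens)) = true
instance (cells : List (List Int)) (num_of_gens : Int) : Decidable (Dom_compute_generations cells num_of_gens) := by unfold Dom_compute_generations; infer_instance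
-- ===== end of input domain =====

-- B computes each generation's neighbor counts by summing eight torus-rotated copies of the
-- grid instead of A's per-cell wrapped lookups (objective: alternative decomposition).
-- Like A, B mutates the argument's row objects in place; the equivalence is about the return value.


-- the 8 neighbor offsets, the same tuple literal in both Python sources
def pvOffsets : List (Int × Int) := [(0, -1), (1, 0), (0, 1), (-1, 0), (-1, -1), (-1, 1), (1, 1), (1, -1)]

-- `cells[i][j] = v` (the indices are the loop variables, always 0 ≤ i < n, 0 ≤ j < m here)
def pvSet2 (g : List (List Int)) (i j : Int) (v : Int) : List (List Int) :=
  g.set i.toNat ((g.getD i.toNat []).set j.toNat v)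

-- ===== PORT A =====
def count_neighbors (cells : List (List Int)) (i j : Int) : Int :=
  let n : Int := (cells.length : Int)
  let m : Int := (((PySem.List.pyGet? cells 0).getD []).length : Int)
  pvOffsets.foldl (fun acc d =>
    if PySem.List.pyGetD
         (PySem.List.pyGetD cells (PySem.Int.mod (i + d.1 + n) n) [])
         (PySem.Int.mod (j + d.2 + m) m) 0 ≠ 0
    then acc + 1 else acc) 0

def compute_generations (cells : List (List Int)) (num_of_gens : Int) : List (List Int) :=
  let n : Int := (cells.length : Int)
  let m : Int := (((PySem.List.pyGet? cells 0).getD []).length : Int)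
  (PySem.List.pyRange 0 num_of_gens 1).foldl (fun cur _g =>
    let cp := cur
    (PySem.List.pyRange 0 n 1).foldl (fun cur i =>
      (PySem.List.pyRange 0 m 1).foldl (fun cur j =>
        let na := count_neighbors cp i j
        if PySem.List.pyGetD (PySem.List.pyGetD cp i []) j 0 ≠ 0 then
          if na < 2 ∨ 3 < na then pvSet2 cur i j 0 else cur
        else if na = 3 then pvSet2 cur i j 1 else cur) cur) cur) cells

-- ===== PORT B =====
def compute_generations_alt (cells : List (List Int)) (num_of_gens : Int) : List (List Int) :=
  let n : Int := (cells.length : Int)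
  let m : Int := (((PySem.List.pyGet? cells 0).getD []).length : Int)
  (PySem.List.pyRange 0 num_of_gens 1).foldl (fun cur _g =>
    let alive := cur.map (fun row =>
      (PySem.List.slice row none (some m)).map (fun v => if v ≠ 0 then (1 : Int) else 0))
    let counts := pvOffsets.foldl (fun counts d =>
      let k := PySem.Int.mod d.1 n
      let rows := PySem.List.slice alive (some k) none ++ PySem.List.slice alive none (some k)
      let rows := if m ≠ 0 then
          let kj := PySem.Int.mod d.2 m
          rows.map (fun r => PySem.List.slice r (some kj) none ++ PySem.List.slice r none (some kj))
        else rows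
      List.zipWith (fun crow srow => List.zipWith (fun c s => c + s) crow srow) counts rows)
      (List.replicate n.toNat (List.replicate m.toNat (0 : Int)))
    (PySem.List.pyRange 0 n 1).foldl (fun cur i =>
      (PySem.List.pyRange 0 m 1).foldl (fun cur j =>
        let c := PySem.List.pyGetD (PySem.List.pyGetD counts i []) j 0
        if PySem.List.pyGetD (PySem.List.pyGetD cur i []) j 0 ≠ 0 then
          if c < 2 ∨ 3 < c then pvSet2 cur i j 0 else cur
        else if c = 3 then pvSet2 cur i j 1 else cur) cur) cur) cells

-- ===== PRECONDITION & SPEC =====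
-- Pre_ excludes exactly the inputs where A raises an IndexError: empty `cells`
-- (len(cells[0])), and, when at least one generation runs, a row shorter than the first row.
def Pre_compute_generations (cells : List (List Int)) (num_of_gens : Int) : Prop :=
  cells ≠ [] ∧ (num_of_gens ≤ 0 ∨ ∀ row ∈ cells, (cells.headD []).length ≤ row.length)
instance (cells : List (List Int)) (num_of_gens : Int) : Decidable (Pre_compute_generations cells num_of_gens) := by unfold Pre_compute_generations; infer_instance

def pvWitness_compute_generations : List (List Int) × Int := ([[0, 1, 0], [0, 1, 0], [0, 1, 0]], 2)

def Spec_compute_generations (cells : List (List Int)) (num_of_gens : Int) (out : List (List Int)) : Prop := out = compute_generations_alt cells num_of_gens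
instance (cells : List (List Int)) (num_of_gens : Int) (out : List (List Int)) : Decidable (Spec_compute_generations cells num_of_gens out) := by unfold Spec_compute_generations; infer_instance

-- ===== CLAIM (what is proved, stated in full; the proofs are below) =====
def Claim_equal_compute_generations : Prop := ∀ (cells : List (List Int)) (num_of_gens : Int), Dom_compute_generations cells num_of_gens → Pre_compute_generations cells num_of_gens → Spec_compute_generations cells num_of_gens (compute_generations cells num_of_gens)

-- ===== LEMMAS AND PROOFS =====

-- cell access with Nat indices
def pvCellN (g : List (List Int)) (a b : Nat) : Int := (g.getD a []).getD b 0

-- 0/1 liveness indicator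
def pvIndN (g : List (List Int)) (a b : Nat) : Int := if pvCellN g a b ≠ 0 then 1 else 0

-- wrapped coordinate
def pvWrap (a : Nat) (x : Int) (n : Nat) : Nat := (PySem.Int.mod ((a : Int) + x) (n : Int)).toNat

-- row count and row lengths preserved
def pvLen (g g' : List (List Int)) : Prop :=
  g'.length = g.length ∧ ∀ a : Nat, (g'.getD a []).length = (g.getD a []).length

-- loop-body helpers (definitionally the bodies of the two ports)
def pvAF (cp : List (List Int)) (i : Int) (cur : List (List Int)) (j : Int) : List (List Int) :=
  if PySem.List.pyGetD (PySem.List.pyGetD cp i []) j 0 ≠ 0 then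
    if count_neighbors cp i j < 2 ∨ 3 < count_neighbors cp i j then pvSet2 cur i j 0 else cur
  else if count_neighbors cp i j = 3 then pvSet2 cur i j 1 else cur

def pvBF (counts : List (List Int)) (i : Int) (cur : List (List Int)) (j : Int) : List (List Int) :=
  if PySem.List.pyGetD (PySem.List.pyGetD cur i []) j 0 ≠ 0 then
    if PySem.List.pyGetD (PySem.List.pyGetD counts i []) j 0 < 2 ∨ 3 < PySem.List.pyGetD (PySem.List.pyGetD counts i []) j 0 then pvSet2 cur i j 0 else cur
  else if PySem.List.pyGetD (PySem.List.pyGetD counts i []) j 0 = 3 then pvSet2 cur i j 1 else cur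

def pvAliveE (g : List (List Int)) (M : Int) : List (List Int) :=
  g.map (fun row => (PySem.List.slice row none (some M)).map (fun v => if v ≠ 0 then (1 : Int) else 0))

def pvStepE (alive : List (List Int)) (N M : Int) (counts : List (List Int)) (d : Int × Int) : List (List Int) :=
  List.zipWith (fun crow srow => List.zipWith (fun c s => c + s) crow srow) counts
    (if M ≠ 0 then
      (PySem.List.slice alive (some (PySem.Int.mod d.1 N)) none
        ++ PySem.List.slice alive none (some (PySem.Int.mod d.1 N))).map
        (fun r => PySem.List.slice r (some (PySem.Int.mod d.2 M)) none
          ++ PySem.List.slice r none (some (PySem.Int.mod d.2 M)))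
     else PySem.List.slice alive (some (PySem.Int.mod d.1 N)) none
        ++ PySem.List.slice alive none (some (PySem.Int.mod d.1 N)))

def pvCountsE (g : List (List Int)) (N M : Int) : List (List Int) :=
  pvOffsets.foldl (pvStepE (pvAliveE g M) N M) (List.replicate N.toNat (List.replicate M.toNat (0 : Int)))

def pvGenA (N M : Int) (cur : List (List Int)) (_g : Int) : List (List Int) :=
  (PySem.List.pyRange 0 N 1).foldl (fun cur2 i => (PySem.List.pyRange 0 M 1).foldl (pvAF cur i) cur2) cur

def pvGenB (N M : Int) (cur : List (List Int)) (_g : Int) : List (List Int) :=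
  (PySem.List.pyRange 0 N 1).foldl (fun cur2 i => (PySem.List.pyRange 0 M 1).foldl (pvBF (pvCountsE cur N M) i) cur2) cur

theorem pvPortA_eq (cells : List (List Int)) (k : Int) :
    compute_generations cells k
      = (PySem.List.pyRange 0 k 1).foldl
          (pvGenA (cells.length : Int) (((PySem.List.pyGet? cells 0).getD []).length : Int)) cells := rfl

theorem pvPortB_eq (cells : List (List Int)) (k : Int) :
    compute_generations_alt cells k
      = (PySem.List.pyRange 0 k 1).foldl
          (pvGenB (cells.length : Int) (((PySem.List.pyGet? cells 0).getD []).length : Int)) cells := rfl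

theorem pvLen_refl (g : List (List Int)) : pvLen g g := ⟨rfl, fun _ => rfl⟩

theorem pvLen_trans {g g' g'' : List (List Int)} (h : pvLen g g') (h' : pvLen g' g'') :
    pvLen g g'' := ⟨h'.1.trans h.1, fun a => (h'.2 a).trans (h.2 a)⟩

theorem pvCellI_eq (g : List (List Int)) (i j : Int) (hi : 0 ≤ i) (hj : 0 ≤ j) :
    PySem.List.pyGetD (PySem.List.pyGetD g i []) j 0 = pvCellN g i.toNat j.toNat := by
  obtain ⟨a, rfl⟩ : ∃ a : Nat, i = (a : Int) := ⟨i.toNat, (Int.toNat_of_nonneg hi).symm⟩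
  obtain ⟨b, rfl⟩ : ∃ b : Nat, j = (b : Int) := ⟨j.toNat, (Int.toNat_of_nonneg hj).symm⟩
  simp [pvCellN]

theorem pvRow_set (g : List (List Int)) (n : Nat) (r : List Int) (a : Nat) :
    (g.set n r).getD a [] = if n = a ∧ n < g.length then r else g.getD a [] := by
  rw [List.getD_eq_getElem?_getD, List.getElem?_set]
  by_cases h1 : n = a
  · subst h1
    by_cases h2 : n < g.length
    · simp [h2]
    · simp [h2, List.getD_eq_getElem?_getD]
  · simp [h1, List.getD_eq_getElem?_getD]

theorem pvGetD_set_ne (r : List Int) (n : Nat) (v : Int) (b : Nat) (h : b ≠ n) :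
    (r.set n v).getD b 0 = r.getD b 0 := by
  rw [List.getD_eq_getElem?_getD, List.getElem?_set, if_neg (fun e => h e.symm),
      ← List.getD_eq_getElem?_getD]

theorem pvSet2_len (g : List (List Int)) (i j v : Int) : pvLen g (pvSet2 g i j v) := by
  refine ⟨by simp [pvSet2], fun a => ?_⟩
  unfold pvSet2
  rw [pvRow_set]
  split_ifs with h
  · rw [List.length_set, ← h.1]
  · rfl

theorem pvSet2_cell_ne (g : List (List Int)) (i j v : Int) (a b : Nat)
    (h : a ≠ i.toNat ∨ b ≠ j.toNat) : pvCellN (pvSet2 g i j v) a b = pvCellN g a b := by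
  unfold pvSet2 pvCellN
  rw [pvRow_set]
  split_ifs with hc
  · rcases h with h | h
    · exact absurd hc.1.symm h
    · rw [← hc.1]
      exact pvGetD_set_ne _ _ _ _ h
  · rfl

theorem pvRot_getD {α : Type} (l : List α) (k a : Nat) (d : α)
    (hk : k ≤ l.length) (ha : a < l.length) :
    (l.drop k ++ l.take k).getD a d = l.getD ((a + k) % l.length) d := by
  have hd : (l.drop k).length = l.length - k := by simp
  rcases Nat.lt_or_ge a (l.length - k) with h | h
  · have h1 : (a + k) % l.length = a + k := Nat.mod_eq_of_lt (by omega)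
    rw [List.getD_eq_getElem?_getD, List.getElem?_append_left (by omega), List.getElem?_drop,
        h1, List.getD_eq_getElem?_getD, Nat.add_comm k a]
  · have h1 : (a + k) % l.length = a + k - l.length := by
      rw [Nat.mod_eq_sub_mod (by omega), Nat.mod_eq_of_lt (by omega)]
    have h2 : a - (l.drop k).length = a + k - l.length := by omega
    rw [List.getD_eq_getElem?_getD, List.getElem?_append_right (by omega), h2,
        List.getElem?_take_of_lt (by omega), h1, List.getD_eq_getElem?_getD]

theorem pvModArith (x : Int) (a n : Nat) (ha : a < n) :
    (a + (PySem.Int.mod x (n : Int)).toNat) % n = pvWrap a x n := by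
  have hn0 : 0 < n := by omega
  have hnz : (0 : Int) < (n : Int) := by exact_mod_cast hn0
  unfold pvWrap
  rw [PySem.Int.mod_eq_emod_of_pos hnz, PySem.Int.mod_eq_emod_of_pos hnz]
  set r := x % (n : Int) with hrdef
  have hr0 : 0 ≤ r := Int.emod_nonneg x (by omega)
  have hrn : r < n := Int.emod_lt_of_pos x hnz
  have hx : (a : Int) + x = ((a : Int) + r) + (n : Int) * (x / (n : Int)) := by
    have := Int.mul_ediv_add_emod x (n : Int)
    omega
  have h2 : ((a : Int) + x) % (n : Int) = ((a : Int) + r) % (n : Int) := by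
    rw [hx]
    exact Int.add_mul_emod_self_left ((a : Int) + r) (n : Int) (x / (n : Int))
  rcases Int.lt_or_le ((a : Int) + r) (n : Int) with h | h
  · have h3 : ((a : Int) + r) % (n : Int) = (a : Int) + r := Int.emod_eq_of_lt (by omega) h
    have h4 : (a + r.toNat) % n = a + r.toNat := Nat.mod_eq_of_lt (by omega)
    rw [h4, h2, h3]
    omega
  · have h3 : ((a : Int) + r) % (n : Int) = (a : Int) + r - n := by
      calc ((a : Int) + r) % (n : Int) = (((a : Int) + r) - n) % n := (Int.sub_emod_right _ _).symm
        _ = (a : Int) + r - n := Int.emod_eq_of_lt (by omega) (by omega)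
    have h4 : (a + r.toNat) % n = a + r.toNat - n := by
      rw [Nat.mod_eq_sub_mod (by omega), Nat.mod_eq_of_lt (by omega)]
    rw [h4, h2, h3]
    omega

theorem pvWrap_lt (a : Nat) (x : Int) (n : Nat) (hn : 0 < n) : pvWrap a x n < n := by
  have hnz : (0 : Int) < (n : Int) := by exact_mod_cast hn
  unfold pvWrap
  rw [PySem.Int.mod_eq_emod_of_pos hnz]
  have h1 := Int.emod_nonneg ((a : Int) + x) (by omega : (n : Int) ≠ 0)
  have h2 := Int.emod_lt_of_pos ((a : Int) + x) hnz
  omega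

theorem pvGetD_map_lt {α β : Type} (l : List α) (f : α → β) (a : Nat) (d : β) (d₀ : α)
    (h : a < l.length) : (l.map f).getD a d = f (l.getD a d₀) := by
  rw [List.getD_eq_getElem (l.map f) d (by simpa using h), List.getElem_map,
      List.getD_eq_getElem l d₀ h]

theorem pvGetD_zipWith {α : Type} (f : α → α → α) (xs ys : List α) (a : Nat) (d : α)
    (hx : a < xs.length) (hy : a < ys.length) :
    (List.zipWith f xs ys).getD a d = f (xs.getD a d) (ys.getD a d) := by
  rw [List.getD_eq_getElem (List.zipWith f xs ys) d (by rw [List.length_zipWith]; omega),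
      List.getElem_zipWith, List.getD_eq_getElem xs d hx, List.getD_eq_getElem ys d hy]

theorem pvFoldl_if_count (f : Int × Int → Int) :
    ∀ (l : List (Int × Int)) (acc : Int),
      l.foldl (fun acc d => if f d ≠ 0 then acc + 1 else acc) acc
        = acc + (l.map (fun d => if f d ≠ 0 then (1 : Int) else 0)).sum := by
  intro l
  induction l with
  | nil => intro acc; simp
  | cons d l ih =>
      intro acc
      rw [List.foldl_cons, List.map_cons, List.sum_cons, ih]
      split_ifs <;> ring

-- === alive grid ===
theorem pvAliveE_len (g : List (List Int)) (M : Int) : (pvAliveE g M).length = g.length := by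
  simp [pvAliveE]

theorem pvAliveE_row (g : List (List Int)) (m : Nat) (a : Nat) (ha : a < g.length) :
    (pvAliveE g (m : Int)).getD a []
      = ((g.getD a []).take m).map (fun v => if v ≠ 0 then (1 : Int) else 0) := by
  unfold pvAliveE
  rw [pvGetD_map_lt g _ a [] [] ha]
  rw [PySem.List.slice_to (g.getD a []) (by exact_mod_cast Nat.zero_le m)]
  simp

theorem pvAliveE_rowlen (g : List (List Int)) (n m : Nat) (hgl : g.length = n)
    (hge : ∀ a : Nat, a < n → m ≤ (g.getD a []).length) (a : Nat) (ha : a < n) :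
    ((pvAliveE g (m : Int)).getD a []).length = m := by
  rw [pvAliveE_row g m a (by omega)]
  rw [List.length_map, List.length_take]
  exact Nat.min_eq_left (hge a ha)

theorem pvAliveE_cell (g : List (List Int)) (n m : Nat) (hgl : g.length = n)
    (hge : ∀ a : Nat, a < n → m ≤ (g.getD a []).length) (a b : Nat) (ha : a < n) (hb : b < m) :
    pvCellN (pvAliveE g (m : Int)) a b = pvIndN g a b := by
  have hblen : b < (g.getD a []).length := lt_of_lt_of_le hb (hge a ha)
  unfold pvCellN pvIndN pvCellN
  rw [pvAliveE_row g m a (by omega)]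
  rw [List.getD_eq_getElem?_getD, List.getElem?_map, List.getElem?_take_of_lt hb,
      List.getElem?_eq_getElem hblen]
  rw [List.getD_eq_getElem (g.getD a []) 0 hblen]
  rfl

-- === the neighbor-count grid ===
theorem pvStepE_cell (alive : List (List Int)) (n m : Nat) (hn : 0 < n)
    (hA : alive.length = n) (hAr : ∀ a : Nat, a < n → (alive.getD a []).length = m)
    (cnts : List (List Int)) (hcl : cnts.length = n)
    (hcr : ∀ a : Nat, a < n → (cnts.getD a []).length = m) (d : Int × Int) :
    (pvStepE alive (n : Int) (m : Int) cnts d).length = n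
    ∧ (∀ a : Nat, a < n → ((pvStepE alive (n : Int) (m : Int) cnts d).getD a []).length = m)
    ∧ (∀ a b : Nat, a < n → b < m →
        pvCellN (pvStepE alive (n : Int) (m : Int) cnts d) a b
          = pvCellN cnts a b + pvCellN alive (pvWrap a d.1 n) (pvWrap b d.2 m)) := by
  have hnz : (0 : Int) < (n : Int) := by exact_mod_cast hn
  have hk0 : 0 ≤ PySem.Int.mod d.1 (n : Int) := PySem.Int.mod_nonneg d.1 hnz
  have hkn : PySem.Int.mod d.1 (n : Int) < (n : Int) := PySem.Int.mod_lt d.1 hnz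
  have hr1len : (PySem.List.slice alive (some (PySem.Int.mod d.1 (n : Int))) none
      ++ PySem.List.slice alive none (some (PySem.Int.mod d.1 (n : Int)))).length = n := by
    rw [PySem.List.slice_from alive hk0, PySem.List.slice_to alive hk0]
    rw [List.length_append, List.length_drop, List.length_take, hA]
    omega
  have hr1row : ∀ a : Nat, a < n →
      (PySem.List.slice alive (some (PySem.Int.mod d.1 (n : Int))) none
        ++ PySem.List.slice alive none (some (PySem.Int.mod d.1 (n : Int)))).getD a []
      = alive.getD (pvWrap a d.1 n) [] := by
    intro a ha
    rw [PySem.List.slice_from alive hk0, PySem.List.slice_to alive hk0]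
    rw [pvRot_getD alive (PySem.Int.mod d.1 (n : Int)).toNat a [] (by omega) (by omega)]
    rw [hA, pvModArith d.1 a n ha]
  by_cases hm0 : m = 0
  · subst hm0
    have hMif : ¬(((0 : Nat) : Int) ≠ 0) := by simp
    refine ⟨?_, ?_, ?_⟩
    · unfold pvStepE
      rw [if_neg hMif, List.length_zipWith, hcl, hr1len, Nat.min_self]
    · intro a ha
      unfold pvStepE
      rw [if_neg hMif]
      rw [pvGetD_zipWith _ cnts _ a [] (by omega) (by omega)]
      rw [List.length_zipWith, hcr a ha]
      omega
    · intro a b _ hb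
      exact absurd hb (Nat.not_lt_zero b)
  · have hm : 0 < m := Nat.pos_of_ne_zero hm0
    have hmz : (0 : Int) < (m : Int) := by exact_mod_cast hm
    have hj0 : 0 ≤ PySem.Int.mod d.2 (m : Int) := PySem.Int.mod_nonneg d.2 hmz
    have hjm : PySem.Int.mod d.2 (m : Int) < (m : Int) := PySem.Int.mod_lt d.2 hmz
    have hMif : ((m : Nat) : Int) ≠ 0 := by exact_mod_cast hm0
    refine ⟨?_, ?_, ?_⟩
    · unfold pvStepE
      rw [if_pos hMif, List.length_zipWith, List.length_map, hcl, hr1len, Nat.min_self]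
    · intro a ha
      unfold pvStepE
      rw [if_pos hMif]
      rw [pvGetD_zipWith _ cnts _ a [] (by omega) (by rw [List.length_map, hr1len]; omega)]
      rw [List.length_zipWith, hcr a ha]
      rw [pvGetD_map_lt _ _ a [] [] (by rw [hr1len]; omega)]
      rw [hr1row a ha]
      have hrl : (alive.getD (pvWrap a d.1 n) []).length = m := hAr _ (pvWrap_lt a d.1 n hn)
      rw [PySem.List.slice_from _ hj0, PySem.List.slice_to _ hj0]
      rw [List.length_append, List.length_drop, List.length_take, hrl]
      omega
    · intro a b ha hb
      unfold pvCellN pvStepE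
      rw [if_pos hMif]
      rw [pvGetD_zipWith _ cnts _ a [] (by omega) (by rw [List.length_map, hr1len]; omega)]
      rw [pvGetD_map_lt _ _ a [] [] (by rw [hr1len]; omega)]
      rw [hr1row a ha]
      have hrl : (alive.getD (pvWrap a d.1 n) []).length = m := hAr _ (pvWrap_lt a d.1 n hn)
      rw [PySem.List.slice_from _ hj0, PySem.List.slice_to _ hj0]
      rw [pvGetD_zipWith _ (cnts.getD a []) _ b 0 (by rw [hcr a ha]; omega)
        (by rw [List.length_append, List.length_drop, List.length_take, hrl]; omega)]
      rw [pvRot_getD (alive.getD (pvWrap a d.1 n) []) (PySem.Int.mod d.2 (m : Int)).toNat b 0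
        (by omega) (by omega)]
      rw [hrl, pvModArith d.2 b m hb]

theorem pvCounts_fold (alive : List (List Int)) (n m : Nat) (hn : 0 < n)
    (hA : alive.length = n) (hAr : ∀ a : Nat, a < n → (alive.getD a []).length = m) :
    ∀ (ds : List (Int × Int)) (cnts : List (List Int)), cnts.length = n →
      (∀ a : Nat, a < n → (cnts.getD a []).length = m) →
      (ds.foldl (pvStepE alive (n : Int) (m : Int)) cnts).length = n
      ∧ (∀ a : Nat, a < n → ((ds.foldl (pvStepE alive (n : Int) (m : Int)) cnts).getD a []).length = m)
      ∧ (∀ a b : Nat, a < n → b < m →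
          pvCellN (ds.foldl (pvStepE alive (n : Int) (m : Int)) cnts) a b
            = pvCellN cnts a b
              + (ds.map (fun d => pvCellN alive (pvWrap a d.1 n) (pvWrap b d.2 m))).sum) := by
  intro ds
  induction ds with
  | nil =>
      intro cnts h1 h2
      exact ⟨h1, h2, fun a b _ _ => by simp⟩
  | cons d ds ih =>
      intro cnts h1 h2
      obtain ⟨s1, s2, s3⟩ := pvStepE_cell alive n m hn hA hAr cnts h1 h2 d
      obtain ⟨t1, t2, t3⟩ := ih (pvStepE alive (n : Int) (m : Int) cnts d) s1 s2
      refine ⟨t1, t2, fun a b ha hb => ?_⟩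
      rw [List.foldl_cons, t3 a b ha hb, s3 a b ha hb, List.map_cons, List.sum_cons]
      ring

theorem pvCountsE_cell (g : List (List Int)) (n m : Nat) (hn : 0 < n)
    (hgl : g.length = n) (hge : ∀ a : Nat, a < n → m ≤ (g.getD a []).length)
    (a b : Nat) (ha : a < n) (hb : b < m) :
    pvCellN (pvCountsE g (n : Int) (m : Int)) a b
      = (pvOffsets.map (fun d => pvIndN g (pvWrap a d.1 n) (pvWrap b d.2 m))).sum := by
  have hm : 0 < m := by omega
  have hA : (pvAliveE g (m : Int)).length = n := by rw [pvAliveE_len, hgl]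
  have hAr : ∀ a : Nat, a < n → ((pvAliveE g (m : Int)).getD a []).length = m :=
    fun a ha => pvAliveE_rowlen g n m hgl hge a ha
  have hi1 : (List.replicate ((n : Int)).toNat (List.replicate ((m : Int)).toNat (0 : Int))).length = n := by
    simp
  have hi2 : ∀ a : Nat, a < n →
      ((List.replicate ((n : Int)).toNat (List.replicate ((m : Int)).toNat (0 : Int))).getD a []).length = m := by
    intro a ha
    rw [List.getD_eq_getElem _ [] (by simpa using ha), List.getElem_replicate, List.length_replicate]
    simp
  have hi3 : pvCellN (List.replicate ((n : Int)).toNat (List.replicate ((m : Int)).toNat (0 : Int))) a b = 0 := by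
    unfold pvCellN
    rw [List.getD_eq_getElem _ [] (by simpa using ha), List.getElem_replicate]
    rw [List.getD_eq_getElem _ 0 (by simpa using hb), List.getElem_replicate]
  unfold pvCountsE
  obtain ⟨-, -, hcell⟩ := pvCounts_fold (pvAliveE g (m : Int)) n m hn hA hAr pvOffsets _ hi1 hi2
  rw [hcell a b ha hb, hi3, zero_add]
  refine congrArg List.sum (List.map_congr_left ?_)
  intro d _
  exact pvAliveE_cell g n m hgl hge _ _ (pvWrap_lt a d.1 n hn) (pvWrap_lt b d.2 m hm)

-- === A's per-cell count as the same sum ===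
theorem pvCN (g : List (List Int)) (n m : Nat) (hn : 0 < n) (hm : 0 < m)
    (hgl : g.length = n) (hgh : ((PySem.List.pyGet? g 0).getD []).length = m)
    (a b : Nat) (_ha : a < n) (_hb : b < m) :
    count_neighbors g (a : Int) (b : Int)
      = (pvOffsets.map (fun d => pvIndN g (pvWrap a d.1 n) (pvWrap b d.2 m))).sum := by
  have hnz : (0 : Int) < (n : Int) := by exact_mod_cast hn
  have hmz : (0 : Int) < (m : Int) := by exact_mod_cast hm
  unfold count_neighbors
  simp only [hgl, hgh]
  refine (pvFoldl_if_count (fun d =>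
      PySem.List.pyGetD
        (PySem.List.pyGetD g (PySem.Int.mod ((a : Int) + d.1 + (n : Int)) (n : Int)) [])
        (PySem.Int.mod ((b : Int) + d.2 + (m : Int)) (m : Int)) 0) pvOffsets 0).trans ?_
  rw [zero_add]
  refine congrArg List.sum (List.map_congr_left ?_)
  intro d _
  have e1 : PySem.Int.mod ((a : Int) + d.1 + (n : Int)) (n : Int) = ((pvWrap a d.1 n : Nat) : Int) := by
    unfold pvWrap
    rw [PySem.Int.mod_eq_emod_of_pos hnz, PySem.Int.mod_eq_emod_of_pos hnz]
    rw [Int.add_emod_right]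
    rw [Int.toNat_of_nonneg (Int.emod_nonneg _ (by omega))]
  have e2 : PySem.Int.mod ((b : Int) + d.2 + (m : Int)) (m : Int) = ((pvWrap b d.2 m : Nat) : Int) := by
    unfold pvWrap
    rw [PySem.Int.mod_eq_emod_of_pos hmz, PySem.Int.mod_eq_emod_of_pos hmz]
    rw [Int.add_emod_right]
    rw [Int.toNat_of_nonneg (Int.emod_nonneg _ (by omega))]
  rw [e1, e2, pvCellI_eq g _ _ (Int.natCast_nonneg _) (Int.natCast_nonneg _),
      Int.toNat_natCast, Int.toNat_natCast]
  rfl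

-- === the write-back loops ===
theorem pvAF_cases (cp : List (List Int)) (i : Int) (cur : List (List Int)) (j : Int) :
    pvAF cp i cur j = cur ∨ ∃ v, pvAF cp i cur j = pvSet2 cur i j v := by
  unfold pvAF
  split_ifs
  · exact Or.inr ⟨0, rfl⟩
  · exact Or.inl rfl
  · exact Or.inr ⟨1, rfl⟩
  · exact Or.inl rfl

theorem pvAF_len (cp : List (List Int)) (i : Int) (cur : List (List Int)) (j : Int) :
    pvLen cur (pvAF cp i cur j) := by
  rcases pvAF_cases cp i cur j with h | ⟨v, h⟩
  · rw [h]; exact pvLen_refl cur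
  · rw [h]; exact pvSet2_len cur i j v

theorem pvAF_pres_row (cp : List (List Int)) (i : Int) (cur : List (List Int)) (j : Int)
    (a b : Nat) (ha : a ≠ i.toNat) : pvCellN (pvAF cp i cur j) a b = pvCellN cur a b := by
  rcases pvAF_cases cp i cur j with h | ⟨v, h⟩
  · rw [h]
  · rw [h]; exact pvSet2_cell_ne cur i j v a b (Or.inl ha)

theorem pvAF_pres_col (cp : List (List Int)) (i : Int) (cur : List (List Int)) (j : Int)
    (a b : Nat) (hb : b ≠ j.toNat) : pvCellN (pvAF cp i cur j) a b = pvCellN cur a b := by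
  rcases pvAF_cases cp i cur j with h | ⟨v, h⟩
  · rw [h]
  · rw [h]; exact pvSet2_cell_ne cur i j v a b (Or.inr hb)

theorem pvInner_eq (cp counts : List (List Int)) (n m : Nat) (i : Int)
    (hi0 : 0 ≤ i) (hin : i < (n : Int))
    (hc : ∀ i' j : Int, 0 ≤ i' → i' < (n : Int) → 0 ≤ j → j < (m : Int) →
        PySem.List.pyGetD (PySem.List.pyGetD counts i' []) j 0 = count_neighbors cp i' j) :
    ∀ js : List Int, js.Nodup → (∀ j ∈ js, 0 ≤ j ∧ j < (m : Int)) →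
    ∀ cur, (∀ j, j ∈ js → pvCellN cur i.toNat j.toNat = pvCellN cp i.toNat j.toNat) →
      js.foldl (pvAF cp i) cur = js.foldl (pvBF counts i) cur
      ∧ pvLen cur (js.foldl (pvAF cp i) cur)
      ∧ ∀ a b : Nat, a ≠ i.toNat → pvCellN (js.foldl (pvAF cp i) cur) a b = pvCellN cur a b := by
  intro js
  induction js with
  | nil =>
      intro _ _ cur _
      exact ⟨rfl, pvLen_refl cur, fun _ _ _ => rfl⟩
  | cons j js ih =>
      intro hnd hbnd cur hag
      have hj := hbnd j (List.mem_cons_self ..)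
      have hBA : pvBF counts i cur j = pvAF cp i cur j := by
        unfold pvAF pvBF
        rw [hc i j hi0 hin hj.1 hj.2]
        rw [show PySem.List.pyGetD (PySem.List.pyGetD cur i []) j 0
            = PySem.List.pyGetD (PySem.List.pyGetD cp i []) j 0 by
          rw [pvCellI_eq cur i j hi0 hj.1, pvCellI_eq cp i j hi0 hj.1]
          exact hag j (List.mem_cons_self ..)]
      rw [List.foldl_cons, List.foldl_cons, hBA]
      have hjnot : j ∉ js := (List.nodup_cons.mp hnd).1
      have hbnd' : ∀ j' ∈ js, 0 ≤ j' ∧ j' < (m : Int) :=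
        fun j' hmem => hbnd j' (List.mem_cons_of_mem _ hmem)
      have hag' : ∀ j', j' ∈ js →
          pvCellN (pvAF cp i cur j) i.toNat j'.toNat = pvCellN cp i.toNat j'.toNat := by
        intro j' hmem
        have hj' := hbnd' j' hmem
        have hne : j' ≠ j := fun e => hjnot (e ▸ hmem)
        have hne' : j'.toNat ≠ j.toNat := by omega
        rw [pvAF_pres_col cp i cur j _ _ hne']
        exact hag j' (List.mem_cons_of_mem _ hmem)
      obtain ⟨e, hlen, pres⟩ := ih (List.nodup_cons.mp hnd).2 hbnd' (pvAF cp i cur j) hag'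
      refine ⟨e, pvLen_trans (pvAF_len cp i cur j) hlen, fun a b hna => ?_⟩
      rw [pres a b hna, pvAF_pres_row cp i cur j a b hna]

theorem pvOuter_eq (cp counts : List (List Int)) (n m : Nat)
    (hc : ∀ i' j : Int, 0 ≤ i' → i' < (n : Int) → 0 ≤ j → j < (m : Int) →
        PySem.List.pyGetD (PySem.List.pyGetD counts i' []) j 0 = count_neighbors cp i' j) :
    ∀ is : List Int, is.Nodup → (∀ i ∈ is, 0 ≤ i ∧ i < (n : Int)) →
    ∀ cur, (∀ i ∈ is, ∀ b : Nat, pvCellN cur i.toNat b = pvCellN cp i.toNat b) →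
      is.foldl (fun cur2 i => (PySem.List.pyRange 0 (m : Int) 1).foldl (pvAF cp i) cur2) cur
        = is.foldl (fun cur2 i => (PySem.List.pyRange 0 (m : Int) 1).foldl (pvBF counts i) cur2) cur
      ∧ pvLen cur (is.foldl (fun cur2 i => (PySem.List.pyRange 0 (m : Int) 1).foldl (pvAF cp i) cur2) cur) := by
  intro is
  induction is with
  | nil =>
      intro _ _ cur _
      exact ⟨rfl, pvLen_refl cur⟩
  | cons i is ih =>
      intro hnd hbnd cur hag
      have hi := hbnd i (List.mem_cons_self ..)
      have hjs : ∀ j ∈ PySem.List.pyRange 0 (m : Int) 1, 0 ≤ j ∧ j < (m : Int) := by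
        intro j hjmem
        rw [PySem.List.mem_pyRange_one] at hjmem
        exact hjmem
      obtain ⟨e1, len1, pres1⟩ := pvInner_eq cp counts n m i hi.1 hi.2 hc
        (PySem.List.pyRange 0 (m : Int) 1) (PySem.List.nodup_pyRange_one 0 (m : Int)) hjs cur
        (fun j _ => hag i (List.mem_cons_self ..) j.toNat)
      simp only [List.foldl_cons]
      rw [← e1]
      have hag' : ∀ i' ∈ is, ∀ b : Nat,
          pvCellN ((PySem.List.pyRange 0 (m : Int) 1).foldl (pvAF cp i) cur) i'.toNat b
            = pvCellN cp i'.toNat b := by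
        intro i' hmem b
        have hi' := hbnd i' (List.mem_cons_of_mem _ hmem)
        have hne : i' ≠ i := fun e => (List.nodup_cons.mp hnd).1 (e ▸ hmem)
        have hne' : i'.toNat ≠ i.toNat := by omega
        rw [pres1 i'.toNat b hne']
        exact hag i' (List.mem_cons_of_mem _ hmem) b
      obtain ⟨e2, len2⟩ := ih (List.nodup_cons.mp hnd).2
        (fun i' h => hbnd i' (List.mem_cons_of_mem _ h))
        ((PySem.List.pyRange 0 (m : Int) 1).foldl (pvAF cp i) cur) hag'
      exact ⟨e2, pvLen_trans len1 len2⟩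

-- === one generation ===
theorem pvGen_step (cells : List (List Int)) (hne : cells ≠ [])
    (hshape : ∀ row ∈ cells, (cells.headD []).length ≤ row.length)
    (s : List (List Int)) (b : Int) (hs : pvLen cells s) :
    pvGenA (cells.length : Int) (((PySem.List.pyGet? cells 0).getD []).length : Int) s b
      = pvGenB (cells.length : Int) (((PySem.List.pyGet? cells 0).getD []).length : Int) s b
    ∧ pvLen cells (pvGenA (cells.length : Int) (((PySem.List.pyGet? cells 0).getD []).length : Int) s b) := by
  have hhead0 : (PySem.List.pyGet? cells 0).getD [] = cells.getD 0 [] := by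
    rw [PySem.List.pyGet?_zero, ← List.getD_eq_getElem?_getD]
  have hheadD : cells.headD [] = cells.getD 0 [] := by cases cells <;> rfl
  set n := cells.length with hn_def
  set m := ((PySem.List.pyGet? cells 0).getD []).length with hm_def
  have hn : 0 < n := List.length_pos_of_ne_nil hne
  have hm_getD : m = (cells.getD 0 []).length := by rw [hm_def, hhead0]
  have hge0 : ∀ a : Nat, a < n → m ≤ (cells.getD a []).length := by
    intro a ha
    have hmem : cells.getD a [] ∈ cells := by
      rw [List.getD_eq_getElem cells [] ha]
      exact List.getElem_mem ha
    have h := hshape _ hmem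
    rw [hheadD, ← hm_getD] at h
    exact h
  have hsl : s.length = n := hs.1
  have hsrow : ∀ a : Nat, (s.getD a []).length = (cells.getD a []).length := hs.2
  have hsh : ((PySem.List.pyGet? s 0).getD []).length = m := by
    rw [show (PySem.List.pyGet? s 0).getD [] = s.getD 0 [] by
      rw [PySem.List.pyGet?_zero, ← List.getD_eq_getElem?_getD]]
    rw [hsrow 0, hm_getD]
  have hsge : ∀ a : Nat, a < n → m ≤ (s.getD a []).length := by
    intro a ha
    rw [hsrow a]
    exact hge0 a ha
  have hcell := pvCountsE_cell s n m hn hsl hsge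
  have hc : ∀ i' j : Int, 0 ≤ i' → i' < (n : Int) → 0 ≤ j → j < (m : Int) →
      PySem.List.pyGetD (PySem.List.pyGetD (pvCountsE s (n : Int) (m : Int)) i' []) j 0
        = count_neighbors s i' j := by
    intro i' j h1 h2 h3 h4
    have hm : 0 < m := by omega
    rw [pvCellI_eq _ _ _ h1 h3, hcell i'.toNat j.toNat (by omega) (by omega)]
    rw [← pvCN s n m hn hm hsl hsh i'.toNat j.toNat (by omega) (by omega)]
    rw [Int.toNat_of_nonneg h1, Int.toNat_of_nonneg h3]
  have houter := pvOuter_eq s (pvCountsE s (n : Int) (m : Int)) n m hc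
    (PySem.List.pyRange 0 (n : Int) 1) (PySem.List.nodup_pyRange_one 0 (n : Int))
    (fun i hi => PySem.List.mem_pyRange_one.mp hi)
    s (fun _ _ _ => rfl)
  exact ⟨houter.1, pvLen_trans hs houter.2⟩

theorem pvFoldl_eq_of_inv {α β : Type} (P : α → Prop) (f h : α → β → α)
    (hstep : ∀ s b, P s → f s b = h s b ∧ P (f s b)) :
    ∀ (l : List β) (s : α), P s → l.foldl f s = l.foldl h s := by
  intro l
  induction l with
  | nil => intro s _; rfl
  | cons b l ih =>
      intro s hs
      rw [List.foldl_cons, List.foldl_cons]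
      exact (ih (f s b) (hstep s b hs).2).trans (by rw [(hstep s b hs).1])

-- ===== VERDICT (by name: the statement is the Claim_ definition above) =====
theorem compute_generations_spec : Claim_equal_compute_generations := by
  intro cells num_of_gens _dom pre
  unfold Spec_compute_generations
  obtain ⟨hne, hor⟩ := pre
  rw [pvPortA_eq, pvPortB_eq]
  rcases hor with hle | hshape
  · rw [PySem.List.pyRange_one_eq_nil hle]
    rfl
  · exact pvFoldl_eq_of_inv (pvLen cells) _ _
      (fun s b hs => pvGen_step cells hne hshape s b hs)
      (PySem.List.pyRange 0 num_of_gens 1) cells (pvLen_refl cells)
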